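-- pv_equiv track=rewrite | github.com/MrEricSir/munimet.ro | lib/train_detector.py | _group_columns
-- ===== SOURCE A (Python) =====
-- def _group_columns(columns, gap_threshold=6):
--     """Group adjacent columns. Gap threshold determines when to split groups."""
--     if len(columns) == 0:
--         return []
--     groups = []
--     start = columns[0]
--     prev = start
--     for x in columns[1:]:
--         if x - prev > gap_threshold:
--             groups.append((start, prev))
--             start = x
--         prev = x
--     groups.append((start, prev))
--     return groups
-- ===== SOURCE B (Python) =====
-- def _group_columns(columns, gap_threshold=6):
--     """Group adjacent columns. Gap threshold determines when to split groups."""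
--     n = len(columns)
--     cuts = [i + 1 for i in range(n - 1)
--             if columns[i + 1] - columns[i] > gap_threshold]
--     bounds = [0] + cuts + [n]
--     return [(columns[a], columns[b - 1])
--             for a, b in zip(bounds, bounds[1:])] if n else []
-- ===== Notes on version B (the rewrite author's own statement) =====
-- stated objective: alternative
-- what changed: Replaces A's single stateful pass (carrying groups/start/prev) with three staged passes: first compute the list of breakpoint indices where the adjacent gap exceeds the threshold, then build segment boundary indices, then map each boundary pair to (columns[a], columns[b-1]).
import Mathlib
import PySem

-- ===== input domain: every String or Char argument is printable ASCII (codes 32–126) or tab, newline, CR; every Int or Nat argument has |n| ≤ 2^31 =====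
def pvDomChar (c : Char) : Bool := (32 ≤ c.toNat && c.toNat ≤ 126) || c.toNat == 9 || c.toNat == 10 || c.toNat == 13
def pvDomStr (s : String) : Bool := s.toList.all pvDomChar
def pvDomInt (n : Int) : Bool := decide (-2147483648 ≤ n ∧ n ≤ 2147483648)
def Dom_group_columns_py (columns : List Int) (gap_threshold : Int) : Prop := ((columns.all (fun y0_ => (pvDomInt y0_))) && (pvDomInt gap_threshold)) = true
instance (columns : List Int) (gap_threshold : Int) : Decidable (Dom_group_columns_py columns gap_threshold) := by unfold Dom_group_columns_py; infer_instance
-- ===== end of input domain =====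

-- B replaces A's single stateful pass with staged passes: breakpoint indices, then boundary pairs, then (first, last) per segment (alternative decomposition, same cost).


-- ===== PORT A =====
-- literal transliteration of A: one fold over columns[1:] carrying (groups, start, prev)
def group_columns_py (columns : List Int) (gap_threshold : Int) : List (Int × Int) :=
  match columns with
  | [] => []
  | c :: rest =>
    let s := rest.foldl
      (fun (st : List (Int × Int) × Int × Int) x =>
        if x - st.2.2 > gap_threshold then (st.1 ++ [(st.2.1, st.2.2)], x, x)
        else (st.1, st.2.1, x))
      ([], c, c)
    s.1 ++ [(s.2.1, s.2.2)]

-- ===== PORT B =====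
-- transliteration of Source B: cuts (breakpoint indices), bounds, then map boundary pairs to (columns[a], columns[b-1]).
-- all indices used are in range when n ≠ 0, so getD's default is never taken.
def group_columns_py_alt (columns : List Int) (gap_threshold : Int) : List (Int × Int) :=
  let n := columns.length
  let cuts := ((List.range (n - 1)).filter
      (fun i => decide (columns.getD (i + 1) 0 - columns.getD i 0 > gap_threshold))).map (· + 1)
  let bounds := [0] ++ cuts ++ [n]
  if n ≠ 0 then
    (bounds.zip (bounds.drop 1)).map (fun ab => (columns.getD ab.1 0, columns.getD (ab.2 - 1) 0))
  else []

-- ===== PRECONDITION & SPEC =====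
def Spec_group_columns_py (columns : List Int) (gap_threshold : Int) (out : List (Int × Int)) : Prop := out = group_columns_py_alt columns gap_threshold
instance (columns : List Int) (gap_threshold : Int) (out : List (Int × Int)) : Decidable (Spec_group_columns_py columns gap_threshold out) := by unfold Spec_group_columns_py; infer_instance

-- ===== CLAIM (what is proved, stated in full; the proofs are below) =====
def Claim_equal_group_columns_py : Prop := ∀ (columns : List Int) (gap_threshold : Int), Dom_group_columns_py columns gap_threshold → Spec_group_columns_py columns gap_threshold (group_columns_py columns gap_threshold)

-- ===== LEMMAS AND PROOFS =====

-- common spec: A's loop as a structural recursion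
def pvGo (gap start prev : Int) : List Int → List (Int × Int)
  | [] => [(start, prev)]
  | x :: xs => if x - prev > gap then (start, prev) :: pvGo gap x x xs else pvGo gap start x xs

-- A's fold, from any state, produces acc ++ pvGo …
theorem pvFoldA (gap : Int) (xs : List Int) : ∀ (acc : List (Int × Int)) (start prev : Int),
    (let s := xs.foldl
      (fun (st : List (Int × Int) × Int × Int) x =>
        if x - st.2.2 > gap then (st.1 ++ [(st.2.1, st.2.2)], x, x)
        else (st.1, st.2.1, x)) (acc, start, prev)
     s.1 ++ [(s.2.1, s.2.2)]) = acc ++ pvGo gap start prev xs := by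
  induction xs with
  | nil => intro acc start prev; simp [pvGo]
  | cons x xs ih =>
    intro acc start prev
    simp only [List.foldl_cons, pvGo]
    by_cases h : x - prev > gap
    · simp only [if_pos h, ih]; simp
    · simp only [if_neg h, ih]

-- recursive characterisation of Source B's breakpoint list (1-based absolute indices)
def pvCuts (gap : Int) : List Int → List Nat
  | [] => []
  | [_] => []
  | x :: y :: t => (if y - x > gap then [1] else []) ++ (pvCuts gap (y :: t)).map (· + 1)

theorem pvCuts_pos (gap : Int) (l : List Int) : ∀ c ∈ pvCuts gap l, 1 ≤ c := by
  induction l with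
  | nil => simp [pvCuts]
  | cons x t ih =>
    cases t with
    | nil => simp [pvCuts]
    | cons y t' =>
      intro c hc
      simp only [pvCuts, List.mem_append, List.mem_map] at hc
      rcases hc with h | ⟨d, _, rfl⟩
      · split_ifs at h <;> simp_all
      · omega

-- the port's filter/range/map computation equals pvCuts
theorem pvCutsEq (gap : Int) (l : List Int) :
    ((List.range (l.length - 1)).filter
      (fun i => decide (l.getD (i + 1) 0 - l.getD i 0 > gap))).map (· + 1) = pvCuts gap l := by
  induction l with
  | nil => simp [pvCuts]
  | cons x t ih =>
    cases t with
    | nil => simp [pvCuts]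
    | cons y t' =>
      have hr : List.range ((x :: y :: t').length - 1)
          = 0 :: (List.range ((y :: t').length - 1)).map (· + 1) := by
        simp [List.range_succ_eq_map]
      rw [hr, List.filter_cons, List.filter_map]
      have hcongr : List.filter
            ((fun i => decide ((x :: y :: t').getD (i + 1) 0 - (x :: y :: t').getD i 0 > gap)) ∘ (· + 1))
            (List.range ((y :: t').length - 1))
          = List.filter (fun i => decide ((y :: t').getD (i + 1) 0 - (y :: t').getD i 0 > gap))
            (List.range ((y :: t').length - 1)) :=
        List.filter_congr (fun i _ => by simp [Function.comp])
      by_cases h : y - x > gap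
      · rw [if_pos (by simpa using h)]
        simp only [pvCuts, if_pos h, List.map_cons, List.cons_append, List.nil_append]
        congr 1
        rw [hcongr, List.map_map, ← ih, List.map_map]
      · rw [if_neg (by simpa using h)]
        simp only [pvCuts, if_neg h, List.nil_append]
        rw [hcongr, List.map_map, ← ih, List.map_map]

-- segment list from cut indices, carrying the start value and the final last value
def pvSeg (l : List Int) (s last : Int) : List Nat → List (Int × Int)
  | [] => [(s, last)]
  | c :: cs => (s, l.getD (c - 1) 0) :: pvSeg l (l.getD c 0) last cs

-- the zip-of-bounds mapping equals pvSeg (for start index 0)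
theorem pvZipSeg (l : List Int) (n : Nat) : ∀ (cs : List Nat) (a : Nat),
    (((a :: cs ++ [n]).zip ((cs : List Nat) ++ [n])).map
        (fun ab => (l.getD ab.1 0, l.getD (ab.2 - 1) 0)))
      = pvSeg l (l.getD a 0) (l.getD (n - 1) 0) cs := by
  intro cs
  induction cs with
  | nil => intro a; simp [pvSeg]
  | cons c cs ih =>
    intro a
    simp only [List.cons_append, List.zip_cons_cons, List.map_cons, pvSeg]
    exact congrArg _ (ih c)

-- shifting: cut indices ≥ 1 shifted by one step into a cons
theorem pvSegShift (x : Int) (l : List Int) (last : Int) : ∀ (cs : List Nat), (∀ c ∈ cs, 1 ≤ c) →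
    ∀ (s : Int), pvSeg (x :: l) s last (cs.map (· + 1)) = pvSeg l s last cs := by
  intro cs
  induction cs with
  | nil => intro _ s; simp [pvSeg]
  | cons c cs ih =>
    intro hpos s
    have hc : 1 ≤ c := hpos c (by simp)
    simp only [List.map_cons, pvSeg]
    have h1 : (x :: l).getD (c + 1 - 1) 0 = l.getD (c - 1) 0 := by
      have : c + 1 - 1 = (c - 1) + 1 := by omega
      rw [this]; simp
    have h2 : (x :: l).getD (c + 1) 0 = l.getD c 0 := by simp
    rw [h1, h2, ih (fun d hd => hpos d (by simp [hd])) _]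

-- main: pvGo equals pvSeg over pvCuts
theorem pvMain (gap : Int) : ∀ (t : List Int) (x s : Int),
    pvGo gap s x t = pvSeg (x :: t) s ((x :: t).getD ((x :: t).length - 1) 0) (pvCuts gap (x :: t)) := by
  intro t
  induction t with
  | nil => intro x s; simp [pvGo, pvCuts, pvSeg]
  | cons y t ih =>
    intro x s
    have hlast : (x :: y :: t).getD ((x :: y :: t).length - 1) 0
        = (y :: t).getD ((y :: t).length - 1) 0 := by
      simp
      rfl
    have hpos := pvCuts_pos gap (y :: t)
    by_cases h : y - x > gap
    · rw [show pvGo gap s x (y :: t)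
            = (s, x) :: pvGo gap y y t from by simp [pvGo, h]]
      rw [show pvCuts gap (x :: y :: t)
            = 1 :: (pvCuts gap (y :: t)).map (· + 1) from by simp [pvCuts, h]]
      simp only [pvSeg]
      rw [hlast, pvSegShift x (y :: t) _ _ hpos]
      rw [ih y y]
      simp
    · rw [show pvGo gap s x (y :: t) = pvGo gap s y t from by simp [pvGo, h]]
      rw [show pvCuts gap (x :: y :: t)
            = (pvCuts gap (y :: t)).map (· + 1) from by simp [pvCuts, h]]
      rw [hlast, pvSegShift x (y :: t) _ _ hpos]
      exact ih y s

-- ===== VERDICT (by name: the statement is the Claim_ definition above) =====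
theorem group_columns_py_spec : Claim_equal_group_columns_py := by
  intro columns gap _
  unfold Spec_group_columns_py
  cases columns with
  | nil => simp [group_columns_py, group_columns_py_alt]
  | cons x t =>
    simp only [group_columns_py, group_columns_py_alt]
    rw [pvFoldA gap t [] x x]
    simp only [List.nil_append, List.length_cons]
    rw [if_pos (show t.length + 1 ≠ 0 by omega)]
    have hc := pvCutsEq gap (x :: t)
    simp only [List.length_cons] at hc
    rw [hc]
    have hz := pvZipSeg (x :: t) (t.length + 1) (pvCuts gap (x :: t)) 0
    simp only [List.cons_append, List.nil_append] at hz ⊢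
    rw [List.drop_one]
    simp only [List.tail_cons]
    rw [hz]
    have := pvMain gap t x x
    simp only [List.getD_cons_zero, List.length_cons] at this ⊢
    rw [this]
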